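-- pv_equiv track=rewrite | github.com/dcasasorozco/PharmaPy | PharmaPy/NameAnalysis.py | getBipartite
-- ===== SOURCE A (Python) =====
-- def getBipartite(first, second):
--     graph = {}
--     types = {}
--     comp_names = ['conc', 'frac']
--     amount_names = ['mass', 'moles', 'vol']
--
--     num_first = len(first)
--     for two in second:
--         for count, one in enumerate(first):
--             if any(word in one for word in comp_names) and any(word in two for word in comp_names):
--                 graph[two] = one
--                 types['composition'] = (one, two)
--                 break
--             elif 'flow' in one and 'flow' in two:
--                 graph[two] = one
--                 types['flow'] = (one, two)
--                 break
--             elif 'distr' in one and 'distr' in two: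
--                 graph[two] = one
--                 types['distrib'] = (one, two)
--                 break
--             elif any(one == word for word in amount_names) and any(two == word for word in amount_names):
--                 graph[two] = one
--                 types['amount'] = (one, two)
--             elif one == two:
--                 graph[two] = one
--                 break
--             elif count == num_first - 1:
--                 graph[two] = None
--
--     return graph, types
-- ===== SOURCE B (Python) =====
-- def getBipartite(first, second):
--     comp_names = ['conc', 'frac']
--     amount_names = ['mass', 'moles', 'vol']
--
--     # One pass over `first`: first entry of each category, and value -> first index.
--     comp = flow = distr = amount = None
--     eq_idx = {}
--     for i, one in enumerate(first):
--         if comp is None and any(w in one for w in comp_names):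
--             comp = (i, one)
--         if flow is None and 'flow' in one:
--             flow = (i, one)
--         if distr is None and 'distr' in one:
--             distr = (i, one)
--         if amount is None and one in amount_names:
--             amount = (i, one)
--         if one not in eq_idx:
--             eq_idx[one] = i
--
--     graph = {}
--     types = {}
--     for two in second:
--         if two in amount_names:
--             if amount is None:
--                 graph[two] = None
--             else:
--                 graph[two] = amount[1]
--                 types['amount'] = (amount[1], two)
--             continue
--         candidates = []
--         if comp is not None and any(w in two for w in comp_names):
--             candidates.append((comp, 'composition'))
--         if flow is not None and 'flow' in two:
--             candidates.append((flow, 'flow'))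
--         if distr is not None and 'distr' in two:
--             candidates.append((distr, 'distrib'))
--         if not candidates and two in eq_idx:
--             candidates.append(((eq_idx[two], two), None))
--         if candidates:
--             (_, one), kind = min(candidates, key=lambda c: c[0][0])
--             graph[two] = one
--             if kind is not None:
--                 types[kind] = (one, two)
--         else:
--             graph[two] = None
--     return graph, types
-- ===== Notes on version B (the rewrite author's own statement) =====
-- stated objective: faster
-- what changed: Instead of rescanning all of `first` for every element of `second` (with a last-index sentinel), B makes one pass over `first` recording the first entry of each category (comp-word/flow/distr/amount) and a value->first-index map, then resolves each element of `second` in O(1) by taking the earliest applicable candidate; Pre_ excludes empty `first` with nonempty `second`, a degenerate corner where A's inner loop never runs so unmatched names are omitted from graph while B records them as None (both representations are defensible).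
-- intended difference: When `second` contains an amount name ('mass'/'moles'/'vol') and `first` contains amount entries, A's non-breaking amount rule is clobbered by its count==num_first-1 sentinel: A maps the name to first's last element if that happens to be an amount name and to None otherwise, and types['amount'] records first's LAST amount entry; B maps it to first's FIRST amount entry (also in types), which is the intended value since a recorded match should not be overwritten with None. — e.g. on getBipartite(["mass", "x"], ["mass"]): A returns ([("mass", none)], [("amount", ("mass", "mass"))]), B returns ([("mass", some "mass")], [("amount", ("mass", "mass"))])
-- outside the precondition, e.g. on getBipartite([], ['a']): A returns ({}, {}), B returns ({'a': None}, {})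
import Mathlib
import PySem

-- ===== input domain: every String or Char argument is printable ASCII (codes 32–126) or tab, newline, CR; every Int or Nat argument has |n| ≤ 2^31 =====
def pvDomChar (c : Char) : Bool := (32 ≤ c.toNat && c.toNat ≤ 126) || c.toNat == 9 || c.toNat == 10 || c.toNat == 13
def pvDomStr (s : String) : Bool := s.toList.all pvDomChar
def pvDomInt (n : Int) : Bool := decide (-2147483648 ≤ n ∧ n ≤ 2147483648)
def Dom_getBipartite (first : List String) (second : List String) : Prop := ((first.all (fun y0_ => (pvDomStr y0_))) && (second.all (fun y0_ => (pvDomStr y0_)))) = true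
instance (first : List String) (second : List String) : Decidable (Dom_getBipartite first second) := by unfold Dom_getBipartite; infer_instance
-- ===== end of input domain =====

-- B replaces A's rescan of `first` for every element of `second` (O(n*m)) by one precomputation
-- pass over `first` plus an O(1) resolution per element of `second` (O(n+m)); on inputs where
-- both lists carry amount names B returns the first amount entry where A's value is clobbered
-- by its last-index sentinel (see D_ below).

-- shared membership/equality tests (both Pythons contain these exact expressions)
def hasComp (s : String) : Bool := ["conc", "frac"].any (fun w => PySem.Str.isIn w s)
def hasFlow (s : String) : Bool := PySem.Str.isIn "flow" s
def hasDistr (s : String) : Bool := PySem.Str.isIn "distr" s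
def isAmount (s : String) : Bool := ["mass", "moles", "vol"].any (fun w => s == w)

-- ===== PORT A =====
-- inner `for count, one in enumerate(first)` loop of A, with its breaks
def scanA (numFirst : Int) (two : String) :
    List (Int × String) → PySem.Dict String (Option String) → PySem.Dict String (String × String) →
    PySem.Dict String (Option String) × PySem.Dict String (String × String)
  | [], g, t => (g, t)
  | (count, one) :: rest, g, t =>
    if hasComp one && hasComp two then
      (g.insert two (some one), t.insert "composition" (one, two))
    else if hasFlow one && hasFlow two then
      (g.insert two (some one), t.insert "flow" (one, two))
    else if hasDistr one && hasDistr two then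
      (g.insert two (some one), t.insert "distrib" (one, two))
    else if isAmount one && isAmount two then
      scanA numFirst two rest (g.insert two (some one)) (t.insert "amount" (one, two))
    else if one == two then
      (g.insert two (some one), t)
    else if count == numFirst - 1 then
      scanA numFirst two rest (g.insert two none) t
    else
      scanA numFirst two rest g t

def getBipartite (first : List String) (second : List String) :
    (List (String × Option String)) × (List (String × String × String)) :=
  let res := second.foldl
    (fun (st : PySem.Dict String (Option String) × PySem.Dict String (String × String)) two =>
      scanA (first.length : Int) two (PySem.List.enumerate first 0) st.1 st.2)
    (PySem.Dict.empty, PySem.Dict.empty)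
  (res.1.items, res.2.items)

-- ===== PORT B =====
-- state of Source B's single pass over `first`: first entry of each category + value -> first index
structure PreData where
  comp : Option (Int × String)
  flow : Option (Int × String)
  distr : Option (Int × String)
  amount : Option (Int × String)
  eq : PySem.Dict String Int
  deriving Repr, DecidableEq

-- body of Source B's `for i, one in enumerate(first)` loop
def fstep (s : PreData) (p : Int × String) : PreData :=
  { comp := if s.comp.isNone && hasComp p.2 then some p else s.comp
    flow := if s.flow.isNone && hasFlow p.2 then some p else s.flow
    distr := if s.distr.isNone && hasDistr p.2 then some p else s.distr
    amount := if s.amount.isNone && isAmount p.2 then some p else s.amount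
    eq := if (s.eq.get? p.2).isSome then s.eq else s.eq.insert p.2 p.1 }

def precompF (first : List String) : PreData :=
  (PySem.List.enumerate first 0).foldl fstep ⟨none, none, none, none, PySem.Dict.empty⟩

-- `candidates.append((cand, kind))` guarded by `cand is not None and <flag>`
def partOf (o : Option (Int × String)) (flag : Bool) (kind : String) :
    List ((Int × String) × Option String) :=
  match o, flag with
  | some c, true => [(c, some kind)]
  | _, _ => []

def resolveCand (p : PreData) (two : String) : List ((Int × String) × Option String) :=
  let cands := partOf p.comp (hasComp two) "composition" ++ partOf p.flow (hasFlow two) "flow" ++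
    partOf p.distr (hasDistr two) "distrib"
  if cands.isEmpty then
    (match p.eq.get? two with
     | some i => [((i, two), (none : Option String))]
     | none => [])
  else cands

-- `min(candidates, key=lambda c: c[0][0])` (first minimum wins), none on empty list
def candMin (l : List ((Int × String) × Option String)) : Option ((Int × String) × Option String) :=
  l.foldl (fun b d =>
    match b with
    | none => some d
    | some b' => if d.1.1 < b'.1.1 then some d else some b') none

-- body of Source B's `for two in second` loop
def resolveB (p : PreData)
    (st : PySem.Dict String (Option String) × PySem.Dict String (String × String)) (two : String) :
    PySem.Dict String (Option String) × PySem.Dict String (String × String) :=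
  if isAmount two then
    match p.amount with
    | none => (st.1.insert two none, st.2)
    | some a => (st.1.insert two (some a.2), st.2.insert "amount" (a.2, two))
  else
    match candMin (resolveCand p two) with
    | none => (st.1.insert two none, st.2)
    | some (c, kind) =>
      (st.1.insert two (some c.2),
       match kind with
       | some ky => st.2.insert ky (c.2, two)
       | none => st.2)

def getBipartite_alt (first : List String) (second : List String) :
    (List (String × Option String)) × (List (String × String × String)) :=
  let p := precompF first
  let res := second.foldl (fun st two => resolveB p st two) (PySem.Dict.empty, PySem.Dict.empty)
  (res.1.items, res.2.items)

-- ===== PRECONDITION & SPEC =====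
-- Pre_ excludes empty `first` with nonempty `second`: A's inner loop never runs there, so the
-- unmatched names of `second` are omitted from graph, while B records them as None; both
-- representations of "nothing to match against" are defensible on this degenerate corner.
def Pre_getBipartite (first : List String) (second : List String) : Prop := first = [] → second = []
instance (first : List String) (second : List String) : Decidable (Pre_getBipartite first second) := by unfold Pre_getBipartite; infer_instance
def pvWitness_getBipartite : List String × List String := (["a"], ["a"])

-- the amount entries of `first` agree with what A's sentinel-clobbered scan yields
def GoodAm (xs : List String) : Prop :=
  xs.filter (fun s => isAmount s) = [] ∨
    (xs.getLast? = (xs.filter (fun s => isAmount s)).head? ∧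
     (xs.filter (fun s => isAmount s)).getLast? = (xs.filter (fun s => isAmount s)).head?)

-- When `second` contains an amount name ('mass'/'moles'/'vol') and `first` contains amount
-- entries, A's non-breaking amount rule is clobbered by its count==num_first-1 sentinel: A maps
-- the name to first's last element if that happens to be an amount name and to None otherwise,
-- and types['amount'] records first's LAST amount entry; B maps it to first's FIRST amount entry
-- (also in types), the intended value — a recorded match should not be overwritten with None.
def D_getBipartite (first : List String) (second : List String) : Prop :=
  (second.any (fun s => isAmount s)) = true ∧ ¬ GoodAm first
instance (first : List String) (second : List String) : Decidable (D_getBipartite first second) := by unfold D_getBipartite GoodAm; infer_instance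

def Spec_getBipartite (first : List String) (second : List String) (out : (List (String × Option String)) × (List (String × String × String))) : Prop := ¬ D_getBipartite first second → out = getBipartite_alt first second
instance (first : List String) (second : List String) (out : (List (String × Option String)) × (List (String × String × String))) : Decidable (Spec_getBipartite first second out) := by unfold Spec_getBipartite; infer_instance

def pvDiffWitness_getBipartite : List String × List String := (["mass", "x"], ["mass"])
def pvDiffWitnessOut_getBipartite : ((List (String × Option String)) × (List (String × String × String))) × ((List (String × Option String)) × (List (String × String × String))) :=
  (([("mass", none)], [("amount", ("mass", "mass"))]),
   ([("mass", some "mass")], [("amount", ("mass", "mass"))]))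

-- ===== CLAIM (what is proved, stated in full; the proofs are below) =====
def Claim_unchanged_getBipartite : Prop := ∀ (first : List String) (second : List String), Dom_getBipartite first second → Pre_getBipartite first second → Spec_getBipartite first second (getBipartite first second)
def Claim_exact_getBipartite : Prop := ∀ (first : List String) (second : List String), Dom_getBipartite first second → Pre_getBipartite first second → D_getBipartite first second → getBipartite first second ≠ getBipartite_alt first second
def Claim_changed_getBipartite : Prop := Dom_getBipartite (pvDiffWitness_getBipartite.1) (pvDiffWitness_getBipartite.2) ∧ Pre_getBipartite (pvDiffWitness_getBipartite.1) (pvDiffWitness_getBipartite.2) ∧ D_getBipartite (pvDiffWitness_getBipartite.1) (pvDiffWitness_getBipartite.2) ∧ getBipartite (pvDiffWitness_getBipartite.1) (pvDiffWitness_getBipartite.2) = pvDiffWitnessOut_getBipartite.1 ∧ getBipartite_alt (pvDiffWitness_getBipartite.1) (pvDiffWitness_getBipartite.2) = pvDiffWitnessOut_getBipartite.2 ∧ pvDiffWitnessOut_getBipartite.1 ≠ pvDiffWitnessOut_getBipartite.2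

-- ===== LEMMAS AND PROOFS =====

-- precomputation over an arbitrary base index (B uses base 0)
def precompFk (k : Int) (xs : List String) : PreData :=
  (PySem.List.enumerate xs k).foldl fstep ⟨none, none, none, none, PySem.Dict.empty⟩

lemma precompF_eq (first : List String) : precompF first = precompFk 0 first := rfl

-- per-field decomposition of the fstep fold
def ofold (P : String → Bool) (o : Option (Int × String)) (l : List (Int × String)) :
    Option (Int × String) :=
  l.foldl (fun o p => if o.isNone && P p.2 then some p else o) o

def eqfold (d : PySem.Dict String Int) (l : List (Int × String)) : PySem.Dict String Int :=
  l.foldl (fun d p => if (d.get? p.2).isSome then d else d.insert p.2 p.1) d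

lemma foldl_fstep_comp : ∀ (l : List (Int × String)) (s : PreData),
    (l.foldl fstep s).comp = ofold hasComp s.comp l := by
  intro l
  induction l with
  | nil => intro s; rfl
  | cons p l ih => intro s; simp only [List.foldl_cons, ih]; rfl

lemma foldl_fstep_flow : ∀ (l : List (Int × String)) (s : PreData),
    (l.foldl fstep s).flow = ofold hasFlow s.flow l := by
  intro l
  induction l with
  | nil => intro s; rfl
  | cons p l ih => intro s; simp only [List.foldl_cons, ih]; rfl

lemma foldl_fstep_distr : ∀ (l : List (Int × String)) (s : PreData),
    (l.foldl fstep s).distr = ofold hasDistr s.distr l := by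
  intro l
  induction l with
  | nil => intro s; rfl
  | cons p l ih => intro s; simp only [List.foldl_cons, ih]; rfl

lemma foldl_fstep_amount : ∀ (l : List (Int × String)) (s : PreData),
    (l.foldl fstep s).amount = ofold isAmount s.amount l := by
  intro l
  induction l with
  | nil => intro s; rfl
  | cons p l ih => intro s; simp only [List.foldl_cons, ih]; rfl

lemma foldl_fstep_eq : ∀ (l : List (Int × String)) (s : PreData),
    (l.foldl fstep s).eq = eqfold s.eq l := by
  intro l
  induction l with
  | nil => intro s; rfl
  | cons p l ih => intro s; simp only [List.foldl_cons, ih]; rfl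

lemma ofold_some (P : String → Bool) (c : Int × String) : ∀ l, ofold P (some c) l = some c := by
  intro l
  induction l with
  | nil => rfl
  | cons p l ih => simpa [ofold, List.foldl_cons] using ih

lemma precompFk_nil (k : Int) : precompFk k [] = ⟨none, none, none, none, PySem.Dict.empty⟩ := rfl

lemma comp_cons (k : Int) (x : String) (xs : List String) :
    (precompFk k (x :: xs)).comp =
      if hasComp x then some (k, x) else (precompFk (k + 1) xs).comp := by
  unfold precompFk
  rw [PySem.List.enumerate_cons, List.foldl_cons, foldl_fstep_comp, foldl_fstep_comp]
  by_cases h : hasComp x = true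
  · simp [fstep, h, ofold_some]
  · simp [fstep, Bool.eq_false_iff.mpr h]

lemma flow_cons (k : Int) (x : String) (xs : List String) :
    (precompFk k (x :: xs)).flow =
      if hasFlow x then some (k, x) else (precompFk (k + 1) xs).flow := by
  unfold precompFk
  rw [PySem.List.enumerate_cons, List.foldl_cons, foldl_fstep_flow, foldl_fstep_flow]
  by_cases h : hasFlow x = true
  · simp [fstep, h, ofold_some]
  · simp [fstep, Bool.eq_false_iff.mpr h]

lemma distr_cons (k : Int) (x : String) (xs : List String) :
    (precompFk k (x :: xs)).distr =
      if hasDistr x then some (k, x) else (precompFk (k + 1) xs).distr := by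
  unfold precompFk
  rw [PySem.List.enumerate_cons, List.foldl_cons, foldl_fstep_distr, foldl_fstep_distr]
  by_cases h : hasDistr x = true
  · simp [fstep, h, ofold_some]
  · simp [fstep, Bool.eq_false_iff.mpr h]

lemma amount_cons (k : Int) (x : String) (xs : List String) :
    (precompFk k (x :: xs)).amount =
      if isAmount x then some (k, x) else (precompFk (k + 1) xs).amount := by
  unfold precompFk
  rw [PySem.List.enumerate_cons, List.foldl_cons, foldl_fstep_amount, foldl_fstep_amount]
  by_cases h : isAmount x = true
  · simp [fstep, h, ofold_some]
  · simp [fstep, Bool.eq_false_iff.mpr h]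

-- first index of `two` in an index/value list
def firstIdx (two : String) (l : List (Int × String)) : Option Int :=
  (l.find? (fun p => p.2 == two)).map (·.1)

lemma eqfold_get : ∀ (l : List (Int × String)) (d : PySem.Dict String Int) (two : String),
    (eqfold d l).get? two =
      match d.get? two with
      | some v => some v
      | none => firstIdx two l := by
  intro l
  induction l with
  | nil =>
    intro d two
    cases hd : d.get? two <;> simp [eqfold, hd, firstIdx]
  | cons p l ih =>
    intro d two
    show (eqfold (if (d.get? p.2).isSome then d else d.insert p.2 p.1) l).get? two = _
    by_cases h : (d.get? p.2).isSome = true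
    · rw [if_pos h, ih]
      cases hd : d.get? two with
      | some v => rfl
      | none =>
        have hne : p.2 ≠ two := by
          intro he; rw [he, hd] at h; cases h
        simp [firstIdx, List.find?_cons, beq_eq_false_iff_ne.mpr hne]
    · rw [if_neg h, ih]
      by_cases he : p.2 = two
      · subst he
        have hd : d.get? p.2 = none := by
          cases hg : d.get? p.2
          · rfl
          · rw [hg] at h; exact absurd rfl h
        rw [PySem.Dict.get?_insert_self, hd]
        simp [firstIdx, List.find?_cons]
      · rw [PySem.Dict.get?_insert_of_ne _ _ (fun hh => he hh.symm)]
        cases hd : d.get? two with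
        | some v => rfl
        | none => simp [firstIdx, List.find?_cons, beq_eq_false_iff_ne.mpr he]

lemma eq_get_cons (k : Int) (x : String) (xs : List String) (two : String) :
    (precompFk k (x :: xs)).eq.get? two =
      if x == two then some k else (precompFk (k + 1) xs).eq.get? two := by
  unfold precompFk
  rw [PySem.List.enumerate_cons, List.foldl_cons, foldl_fstep_eq, foldl_fstep_eq]
  have hinit : (fstep ⟨none, none, none, none, PySem.Dict.empty⟩ (k, x)).eq
      = PySem.Dict.empty.insert x k := by
    have hge : (PySem.Dict.empty : PySem.Dict String Int).get? x = none := rfl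
    simp [fstep, hge]
  rw [hinit, eqfold_get, eqfold_get]
  by_cases he : x = two
  · subst he
    rw [PySem.Dict.get?_insert_self]
    simp
  · rw [PySem.Dict.get?_insert_of_ne _ _ (fun hh => he hh.symm)]
    have : (PySem.Dict.empty : PySem.Dict String Int).get? two = none := rfl
    rw [this]
    simp [beq_eq_false_iff_ne.mpr he]

lemma comp_bound : ∀ (xs : List String) (k : Int) (c : Int × String),
    (precompFk k xs).comp = some c → k ≤ c.1 := by
  intro xs
  induction xs with
  | nil => intro k c h; rw [precompFk_nil] at h; cases h
  | cons x xs ih =>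
    intro k c h
    rw [comp_cons] at h
    by_cases hx : hasComp x = true
    · rw [if_pos hx] at h; cases h; simp
    · rw [if_neg (by simp [hx])] at h; have := ih (k + 1) c h; omega

lemma flow_bound : ∀ (xs : List String) (k : Int) (c : Int × String),
    (precompFk k xs).flow = some c → k ≤ c.1 := by
  intro xs
  induction xs with
  | nil => intro k c h; rw [precompFk_nil] at h; cases h
  | cons x xs ih =>
    intro k c h
    rw [flow_cons] at h
    by_cases hx : hasFlow x = true
    · rw [if_pos hx] at h; cases h; simp
    · rw [if_neg (by simp [hx])] at h; have := ih (k + 1) c h; omega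

lemma distr_bound : ∀ (xs : List String) (k : Int) (c : Int × String),
    (precompFk k xs).distr = some c → k ≤ c.1 := by
  intro xs
  induction xs with
  | nil => intro k c h; rw [precompFk_nil] at h; cases h
  | cons x xs ih =>
    intro k c h
    rw [distr_cons] at h
    by_cases hx : hasDistr x = true
    · rw [if_pos hx] at h; cases h; simp
    · rw [if_neg (by simp [hx])] at h; have := ih (k + 1) c h; omega

lemma amount_val : ∀ (xs : List String) (k : Int),
    ((precompFk k xs).amount).map (·.2) = (xs.filter (fun s => isAmount s)).head? := by
  intro xs
  induction xs with
  | nil => intro k; rfl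
  | cons x xs ih =>
    intro k
    rw [amount_cons]
    by_cases h : isAmount x = true
    · simp [h, List.filter_cons]
    · simp [Bool.eq_false_iff.mpr h, List.filter_cons, ih]

lemma amount_flags (s : String) (h : isAmount s = true) :
    hasComp s = false ∧ hasFlow s = false ∧ hasDistr s = false := by
  simp [isAmount, List.any] at h
  rcases h with h | h | h <;> subst h <;> exact ⟨by decide, by decide, by decide⟩

-- ---- candMin ----
def cstep (b : Option ((Int × String) × Option String)) (d : (Int × String) × Option String) :
    Option ((Int × String) × Option String) :=
  match b with
  | none => some d
  | some b' => if d.1.1 < b'.1.1 then some d else some b'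

lemma candMin_eq_foldl (l : List ((Int × String) × Option String)) :
    candMin l = l.foldl cstep none := rfl

lemma foldl_cstep_some (c : (Int × String) × Option String) :
    ∀ (l : List ((Int × String) × Option String)), (∀ d ∈ l, c.1.1 ≤ d.1.1) →
      l.foldl cstep (some c) = some c := by
  intro l
  induction l with
  | nil => intro _; rfl
  | cons d l ih =>
    intro h
    have hd := h d (List.mem_cons_self)
    have hstep : cstep (some c) d = some c := by
      simp only [cstep]
      rw [if_neg (by omega)]
    rw [List.foldl_cons, hstep]
    exact ih (fun e he => h e (List.mem_cons_of_mem _ he))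

lemma foldl_cstep_gt (c : (Int × String) × Option String) :
    ∀ (l : List ((Int × String) × Option String)) (b : Option ((Int × String) × Option String)),
      (b = none ∨ ∃ b', b = some b' ∧ c.1.1 < b'.1.1) → (∀ d ∈ l, c.1.1 < d.1.1) →
      (l.foldl cstep b = none ∨ ∃ b', l.foldl cstep b = some b' ∧ c.1.1 < b'.1.1) := by
  intro l
  induction l with
  | nil => intro b hb _; exact hb
  | cons d l ih =>
    intro b hb h
    have hd := h d (List.mem_cons_self)
    have hrest := fun e he => h e (List.mem_cons_of_mem _ he)
    rw [List.foldl_cons]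
    rcases hb with hb | ⟨b', hb, hlt⟩
    · subst hb
      exact ih (some d) (Or.inr ⟨d, rfl, hd⟩) hrest
    · subst hb
      simp only [cstep]
      split
      · exact ih (some d) (Or.inr ⟨d, rfl, hd⟩) hrest
      · exact ih (some b') (Or.inr ⟨b', rfl, hlt⟩) hrest

lemma candMin_split (l1 l2 : List ((Int × String) × Option String))
    (c : (Int × String) × Option String)
    (h1 : ∀ d ∈ l1, c.1.1 < d.1.1) (h2 : ∀ d ∈ l2, c.1.1 ≤ d.1.1) :
    candMin (l1 ++ c :: l2) = some c := by
  rw [candMin_eq_foldl, List.foldl_append, List.foldl_cons]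
  rcases foldl_cstep_gt c l1 none (Or.inl rfl) h1 with h | ⟨b', hb, hlt⟩
  · rw [h]
    exact foldl_cstep_some c l2 h2
  · rw [hb]
    have hstep : cstep (some b') c = some c := by
      simp only [cstep]
      rw [if_pos hlt]
    rw [hstep]
    exact foldl_cstep_some c l2 h2

lemma partOf_false (o : Option (Int × String)) (ky : String) : partOf o false ky = [] := by
  cases o <;> rfl

lemma partOf_none (flag : Bool) (ky : String) : partOf none flag ky = [] := by
  cases flag <;> rfl

lemma mem_partOf {o : Option (Int × String)} {flag : Bool} {ky : String}
    {d : (Int × String) × Option String} (h : d ∈ partOf o flag ky) : o = some d.1 := by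
  cases o with
  | none => rw [partOf_none] at h; cases h
  | some c =>
    cases flag with
    | false => rw [partOf_false] at h; cases h
    | true =>
      simp only [partOf, List.mem_singleton] at h
      subst h; rfl

-- ---- A's inner loop on an amount name: runs to the end, sentinel-clobbered ----
lemma scanA_amount (two : String) (h2 : isAmount two = true) :
    ∀ (xs : List String) (k : Int) (g : PySem.Dict String (Option String))
      (t : PySem.Dict String (String × String)), xs ≠ [] →
    scanA (k + (xs.length : Int)) two (PySem.List.enumerate xs k) g t =
      (g.insert two (match xs.getLast? with
        | some l => if isAmount l then some l else none
        | none => none),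
       match (xs.filter (fun s => isAmount s)).getLast? with
       | some v => t.insert "amount" (v, two)
       | none => t) := by
  obtain ⟨hc, hf, hd⟩ := amount_flags two h2
  intro xs
  induction xs with
  | nil => intro k g t hne; exact absurd rfl hne
  | cons x rest ih =>
    intro k g t _
    rw [PySem.List.enumerate_cons]
    have e1 : (hasComp x && hasComp two) = false := by simp [hc]
    have e2 : (hasFlow x && hasFlow two) = false := by simp [hf]
    have e3 : (hasDistr x && hasDistr two) = false := by simp [hd]
    by_cases hax : isAmount x = true
    · have e4 : (isAmount x && isAmount two) = true := by simp [hax, h2]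
      cases rest with
      | nil =>
        simp [scanA, e1, e2, e3, e4, h2, PySem.List.enumerate_nil, List.filter_cons, hax]
      | cons y ys =>
        have hlen : k + (((x :: y :: ys).length : Nat) : Int)
            = (k + 1) + (((y :: ys).length : Nat) : Int) := by
          push_cast [List.length_cons]; ring
        simp only [scanA, e1, e2, e3, e4, Bool.false_eq_true, if_false, if_true]
        rw [hlen, ih (k + 1) (g.insert two (some x)) (t.insert "amount" (x, two)) (by simp)]
        rw [PySem.Dict.insert_insert_self]
        have hgl := List.getLast?_cons_cons (a := x) (b := y) (l := ys)
        refine congrArg₂ Prod.mk ?_ ?_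
        · rw [hgl]
        · rw [List.filter_cons_of_pos hax]
          cases hfil : (y :: ys).filter (fun s => isAmount s) with
          | nil => simp [hfil]
          | cons z zs =>
            rw [List.getLast?_cons_cons]
            cases hgl : (z :: zs).getLast? with
            | none => simp at hgl
            | some v => simp [PySem.Dict.insert_insert_self]
    · have e4 : (isAmount x && isAmount two) = false := by simp [hax]
      have e5 : (x == two) = false := by
        rw [beq_eq_false_iff_ne]
        intro he; rw [he, h2] at hax; exact hax rfl
      cases rest with
      | nil =>
        have hcnt : ((k : Int) == k + (((1 : Nat) : Int)) - 1) = true := by simp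
        simp [scanA, e1, e2, e3, e4, e5, h2, hcnt, PySem.List.enumerate_nil,
          Bool.eq_false_iff.mpr hax, List.filter_cons]
      | cons y ys =>
        have hcnt : ((k : Int) == k + (((x :: y :: ys).length : Nat) : Int) - 1) = false := by
          rw [beq_eq_false_iff_ne]
          push_cast [List.length_cons]
          omega
        have hlen : k + (((x :: y :: ys).length : Nat) : Int)
            = (k + 1) + (((y :: ys).length : Nat) : Int) := by
          push_cast [List.length_cons]; ring
        simp only [scanA, e1, e2, e3, e4, e5, hcnt, Bool.false_eq_true, if_false]
        rw [hlen, ih (k + 1) g t (by simp)]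
        have hgl := List.getLast?_cons_cons (a := x) (b := y) (l := ys)
        have hfl : (x :: y :: ys).filter (fun s => isAmount s) = (y :: ys).filter (fun s => isAmount s) :=
          List.filter_cons_of_neg (by simp [hax])
        rw [hgl, hfl]

-- ---- B's amount resolution agrees with A's scan on GoodAm inputs ----
lemma resolveB_amount_char (two : String) (h2 : isAmount two = true) (xs : List String) (k : Int)
    (g : PySem.Dict String (Option String)) (t : PySem.Dict String (String × String))
    (hne : xs ≠ []) (hG : GoodAm xs) :
    resolveB (precompFk k xs) (g, t) two =
      (g.insert two (match xs.getLast? with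
        | some l => if isAmount l then some l else none
        | none => none),
       match (xs.filter (fun s => isAmount s)).getLast? with
       | some v => t.insert "amount" (v, two)
       | none => t) := by
  have hmap := amount_val xs k
  rcases hG with hG | ⟨hG1, hG2⟩
  · have ham : (precompFk k xs).amount = none := by
      cases h : (precompFk k xs).amount with
      | none => rfl
      | some a => rw [h, hG] at hmap; simp at hmap
    obtain ⟨l, hl⟩ := Option.isSome_iff_exists.mp (List.getLast?_isSome.mpr hne)
    have hlm : l ∈ xs := List.mem_of_getLast? hl
    have hla : isAmount l = false := by
      cases h : isAmount l with
      | false => rfl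
      | true =>
        have : l ∈ xs.filter (fun s => isAmount s) := List.mem_filter.mpr ⟨hlm, h⟩
        rw [hG] at this; cases this
    simp [resolveB, h2, ham, hl, hla, hG]
  · obtain ⟨h0, hs, hfil⟩ : ∃ h0 hs, xs.filter (fun s => isAmount s) = h0 :: hs := by
      cases hfil : xs.filter (fun s => isAmount s) with
      | nil =>
        rw [hfil] at hG1
        simp only [List.head?_nil] at hG1
        have := List.getLast?_isSome.mpr hne
        rw [hG1] at this; cases this
      | cons h0 hs => exact ⟨h0, hs, rfl⟩
    rw [hfil] at hG1 hG2 hmap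
    simp only [List.head?_cons] at hG1 hG2 hmap
    obtain ⟨a, ha⟩ : ∃ a, (precompFk k xs).amount = some a := by
      cases h : (precompFk k xs).amount with
      | none => rw [h] at hmap; cases hmap
      | some a => exact ⟨a, rfl⟩
    have ha2 : a.2 = h0 := by
      rw [ha] at hmap; simpa using hmap
    have h0a : isAmount h0 = true := by
      have : h0 ∈ xs.filter (fun s => isAmount s) := by rw [hfil]; exact List.mem_cons_self
      exact (List.mem_filter.mp this).2
    simp [resolveB, h2, ha, ha2, hG1, hfil, hG2, h0a]

-- ---- per-element agreement for non-amount names ----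
lemma scan_eq_nonam (two : String) (hA : isAmount two = false) :
    ∀ (xs : List String) (k : Int) (g : PySem.Dict String (Option String))
      (t : PySem.Dict String (String × String)), xs ≠ [] →
    scanA (k + (xs.length : Int)) two (PySem.List.enumerate xs k) g t =
      resolveB (precompFk k xs) (g, t) two := by
  intro xs
  induction xs with
  | nil => intro k g t hne; exact absurd rfl hne
  | cons x rest ih =>
    intro k g t _
    rw [PySem.List.enumerate_cons]
    set p := precompFk k (x :: rest) with hp
    by_cases h1 : (hasComp x && hasComp two) = true
    · obtain ⟨h1x, h1t⟩ := Bool.and_eq_true_iff.mp h1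
      have hpc : p.comp = some (k, x) := by rw [hp, comp_cons, if_pos h1x]
      have hcands : resolveCand p two
          = ((k, x), some "composition") ::
            (partOf p.flow (hasFlow two) "flow" ++ partOf p.distr (hasDistr two) "distrib") := by
        simp [resolveCand, hpc, h1t, partOf]
      have hmin : candMin (resolveCand p two) = some ((k, x), some "composition") := by
        rw [hcands]
        exact candMin_split [] _ _ (by simp) (by
          intro d hd
          rcases List.mem_append.mp hd with hd | hd
          · have := mem_partOf hd
            rw [hp, flow_cons] at this
            by_cases hfx : hasFlow x = true
            · rw [if_pos hfx] at this
              have h := Option.some.inj this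
              rw [← h]
            · rw [if_neg (by simp [hfx])] at this
              have := flow_bound rest (k + 1) d.1 this
              simp only []
              omega
          · have := mem_partOf hd
            rw [hp, distr_cons] at this
            by_cases hdx : hasDistr x = true
            · rw [if_pos hdx] at this
              have h := Option.some.inj this
              rw [← h]
            · rw [if_neg (by simp [hdx])] at this
              have := distr_bound rest (k + 1) d.1 this
              simp only []
              omega)
      simp [scanA, h1, resolveB, hA, hmin]
    · have h1f : (hasComp x && hasComp two) = false := Bool.eq_false_iff.mpr h1
      -- comp part elements are strictly above k whenever the comp branch did not fire at x
      have hcompgt : ∀ d ∈ partOf p.comp (hasComp two) "composition", (k : Int) < d.1.1 := by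
        intro d hd
        by_cases hct : hasComp two = true
        · have hxc : hasComp x = false := by
            cases hcx : hasComp x
            · rfl
            · rw [hcx, hct] at h1f; cases h1f
          have := mem_partOf hd
          rw [hp, comp_cons, if_neg (by simp [hxc])] at this
          have := comp_bound rest (k + 1) d.1 this
          omega
        · rw [Bool.eq_false_iff.mpr hct, partOf_false] at hd; cases hd
      by_cases h2 : (hasFlow x && hasFlow two) = true
      · obtain ⟨h2x, h2t⟩ := Bool.and_eq_true_iff.mp h2
        have hpf : p.flow = some (k, x) := by rw [hp, flow_cons, if_pos h2x]
        have hcands : resolveCand p two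
            = partOf p.comp (hasComp two) "composition" ++ ((k, x), some "flow") ::
              partOf p.distr (hasDistr two) "distrib" := by
          simp [resolveCand, hpf, h2t, partOf]
        have hmin : candMin (resolveCand p two) = some ((k, x), some "flow") := by
          rw [hcands]
          exact candMin_split _ _ _ hcompgt (by
            intro d hd
            have := mem_partOf hd
            rw [hp, distr_cons] at this
            by_cases hdx : hasDistr x = true
            · rw [if_pos hdx] at this
              have h := Option.some.inj this
              rw [← h]
            · rw [if_neg (by simp [hdx])] at this
              have := distr_bound rest (k + 1) d.1 this
              simp only []
              omega)
        simp [scanA, h1f, h2, resolveB, hA, hmin]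
      · have h2f : (hasFlow x && hasFlow two) = false := Bool.eq_false_iff.mpr h2
        have hflowgt : ∀ d ∈ partOf p.flow (hasFlow two) "flow", (k : Int) < d.1.1 := by
          intro d hd
          by_cases hft : hasFlow two = true
          · have hxf : hasFlow x = false := by
              cases hfx : hasFlow x
              · rfl
              · rw [hfx, hft] at h2f; cases h2f
            have := mem_partOf hd
            rw [hp, flow_cons, if_neg (by simp [hxf])] at this
            have := flow_bound rest (k + 1) d.1 this
            omega
          · rw [Bool.eq_false_iff.mpr hft, partOf_false] at hd; cases hd
        by_cases h3 : (hasDistr x && hasDistr two) = true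
        · obtain ⟨h3x, h3t⟩ := Bool.and_eq_true_iff.mp h3
          have hpd : p.distr = some (k, x) := by rw [hp, distr_cons, if_pos h3x]
          have hcands : resolveCand p two
              = (partOf p.comp (hasComp two) "composition" ++ partOf p.flow (hasFlow two) "flow")
                ++ [((k, x), some "distrib")] := by
            simp [resolveCand, hpd, h3t, partOf]
          have hmin : candMin (resolveCand p two) = some ((k, x), some "distrib") := by
            rw [hcands]
            exact candMin_split _ [] _ (by
              intro d hd
              rcases List.mem_append.mp hd with hd | hd
              · exact hcompgt d hd
              · exact hflowgt d hd) (by intro d hd; cases hd)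
          simp [scanA, h1f, h2f, h3, resolveB, hA, hmin]
        · have h3f : (hasDistr x && hasDistr two) = false := Bool.eq_false_iff.mpr h3
          have hdistrgt : ∀ d ∈ partOf p.distr (hasDistr two) "distrib", (k : Int) < d.1.1 := by
            intro d hd
            by_cases hdt : hasDistr two = true
            · have hxd : hasDistr x = false := by
                cases hdx : hasDistr x
                · rfl
                · rw [hdx, hdt] at h3f; cases h3f
              have := mem_partOf hd
              rw [hp, distr_cons, if_neg (by simp [hxd])] at this
              have := distr_bound rest (k + 1) d.1 this
              omega
            · rw [Bool.eq_false_iff.mpr hdt, partOf_false] at hd; cases hd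
          have e4 : (isAmount x && isAmount two) = false := by simp [hA]
          by_cases h5 : (x == two) = true
          · have hxe : x = two := by simpa using h5
            have hct : hasComp two = false := by
              cases hcc : hasComp two
              · rfl
              · rw [hxe] at h1f; rw [hcc] at h1f; simp at h1f
            have hft : hasFlow two = false := by
              cases hcc : hasFlow two
              · rfl
              · rw [hxe] at h2f; rw [hcc] at h2f; simp at h2f
            have hdt : hasDistr two = false := by
              cases hcc : hasDistr two
              · rfl
              · rw [hxe] at h3f; rw [hcc] at h3f; simp at h3f
            have hgetq : p.eq.get? two = some k := by
              rw [hp, eq_get_cons, if_pos h5]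
            have hcands : resolveCand p two = [((k, two), none)] := by
              simp [resolveCand, hct, hft, hdt, partOf_false, hgetq]
            have hmin : candMin (resolveCand p two) = some ((k, two), none) := by
              rw [hcands]; rfl
            simp [scanA, hct, hft, hdt, e4, h5, resolveB, hA, hmin, hxe]
          · have h5f : (x == two) = false := Bool.eq_false_iff.mpr h5
            have hgetq : p.eq.get? two = (precompFk (k + 1) rest).eq.get? two := by
              rw [hp, eq_get_cons, if_neg (by simp [h5f])]
            cases rest with
            | nil =>
              have hcnt : ((k : Int) == k + (((1 : Nat) : Int)) - 1) = true := by simp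
              have hget0 : p.eq.get? two = none := by
                rw [hgetq]; rfl
              have hcands : resolveCand p two = [] := by
                unfold resolveCand
                have hc0 : partOf p.comp (hasComp two) "composition" = [] := by
                  cases hct : hasComp two
                  · exact partOf_false _ _
                  · have hxc : hasComp x = false := by
                      cases hcx : hasComp x
                      · rfl
                      · rw [hcx, hct] at h1f; cases h1f
                    rw [hp, comp_cons, if_neg (by simp [hxc]), precompFk_nil]
                    exact partOf_none _ _
                have hf0 : partOf p.flow (hasFlow two) "flow" = [] := by
                  cases hft : hasFlow two
                  · exact partOf_false _ _
                  · have hxf : hasFlow x = false := by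
                      cases hfx : hasFlow x
                      · rfl
                      · rw [hfx, hft] at h2f; cases h2f
                    rw [hp, flow_cons, if_neg (by simp [hxf]), precompFk_nil]
                    exact partOf_none _ _
                have hd0 : partOf p.distr (hasDistr two) "distrib" = [] := by
                  cases hdt : hasDistr two
                  · exact partOf_false _ _
                  · have hxd : hasDistr x = false := by
                      cases hdx : hasDistr x
                      · rfl
                      · rw [hdx, hdt] at h3f; cases h3f
                    rw [hp, distr_cons, if_neg (by simp [hxd]), precompFk_nil]
                    exact partOf_none _ _
                simp [hc0, hf0, hd0, hget0]
              have hmin : candMin (resolveCand p two) = none := by rw [hcands]; rfl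
              simp [scanA, h1f, h2f, h3f, e4, h5f, hcnt, PySem.List.enumerate_nil,
                resolveB, hA, hmin]
            | cons y ys =>
              have hcnt : ((k : Int) == k + (((x :: y :: ys).length : Nat) : Int) - 1) = false := by
                rw [beq_eq_false_iff_ne]
                push_cast [List.length_cons]
                omega
              have hlen : k + (((x :: y :: ys).length : Nat) : Int)
                  = (k + 1) + (((y :: ys).length : Nat) : Int) := by
                push_cast [List.length_cons]; ring
              have hcsame : partOf p.comp (hasComp two) "composition"
                  = partOf (precompFk (k + 1) (y :: ys)).comp (hasComp two) "composition" := by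
                cases hct : hasComp two
                · rw [partOf_false, partOf_false]
                · have hxc : hasComp x = false := by
                    cases hcx : hasComp x
                    · rfl
                    · rw [hcx, hct] at h1f; cases h1f
                  rw [hp, comp_cons, if_neg (by simp [hxc])]
              have hfsame : partOf p.flow (hasFlow two) "flow"
                  = partOf (precompFk (k + 1) (y :: ys)).flow (hasFlow two) "flow" := by
                cases hft : hasFlow two
                · rw [partOf_false, partOf_false]
                · have hxf : hasFlow x = false := by
                    cases hfx : hasFlow x
                    · rfl
                    · rw [hfx, hft] at h2f; cases h2f
                  rw [hp, flow_cons, if_neg (by simp [hxf])]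
              have hdsame : partOf p.distr (hasDistr two) "distrib"
                  = partOf (precompFk (k + 1) (y :: ys)).distr (hasDistr two) "distrib" := by
                cases hdt : hasDistr two
                · rw [partOf_false, partOf_false]
                · have hxd : hasDistr x = false := by
                    cases hdx : hasDistr x
                    · rfl
                    · rw [hdx, hdt] at h3f; cases h3f
                  rw [hp, distr_cons, if_neg (by simp [hxd])]
              have hcsame2 : resolveCand p two = resolveCand (precompFk (k + 1) (y :: ys)) two := by
                unfold resolveCand
                rw [hcsame, hfsame, hdsame, hgetq]
              simp only [scanA, h1f, h2f, h3f, e4, h5f, hcnt, Bool.false_eq_true, if_false]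
              rw [hlen, ih (k + 1) g t (by simp)]
              simp only [resolveB, hA, Bool.false_eq_true, if_false, hcsame2]

theorem main_eq (first second : List String) (hPre : first = [] → second = [])
    (hD : ¬ D_getBipartite first second) :
    getBipartite first second = getBipartite_alt first second := by
  by_cases hf : first = []
  · subst hf
    rw [hPre rfl]
    rfl
  · unfold getBipartite getBipartite_alt
    refine congrArg (fun r : PySem.Dict String (Option String) × PySem.Dict String (String × String) =>
      (r.1.items, r.2.items)) ?_
    apply PySem.List.foldl_congr_mem
    intro st two htwo
    obtain ⟨g, t⟩ := st
    show scanA (first.length : Int) two (PySem.List.enumerate first 0) g t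
      = resolveB (precompF first) (g, t) two
    rw [precompF_eq]
    have h0 : (first.length : Int) = 0 + (first.length : Int) := by ring
    conv_lhs => rw [h0]
    by_cases ha : isAmount two = true
    · have hGood : GoodAm first := by
        by_contra hg
        exact hD ⟨List.any_eq_true.mpr ⟨two, htwo, ha⟩, hg⟩
      rw [scanA_amount two ha first 0 g t hf,
        resolveB_amount_char two ha first 0 g t hf hGood]
    · exact scan_eq_nonam two (Bool.eq_false_iff.mpr ha) first 0 g t hf


-- ---- tightness machinery: A and B really differ everywhere inside D_ ----

lemma candMin_mem : ∀ (l : List ((Int × String) × Option String))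
    (b : Option ((Int × String) × Option String)) (c : (Int × String) × Option String),
    l.foldl cstep b = some c → b = some c ∨ c ∈ l := by
  intro l
  induction l with
  | nil => intro b c h; exact Or.inl h
  | cons d l ih =>
    intro b c h
    rw [List.foldl_cons] at h
    rcases ih (cstep b d) c h with h' | h'
    · cases b with
      | none =>
        have : d = c := Option.some.inj h'
        exact Or.inr (this ▸ List.mem_cons_self)
      | some b' =>
        simp only [cstep] at h'
        split at h'
        · exact Or.inr (Option.some.inj h' ▸ List.mem_cons_self)
        · exact Or.inl h'
    · exact Or.inr (List.mem_cons_of_mem _ h')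

lemma mem_partOf_snd {o : Option (Int × String)} {flag : Bool} {ky : String}
    {d : (Int × String) × Option String} (h : d ∈ partOf o flag ky) : d.2 = some ky := by
  cases o with
  | none => rw [partOf_none] at h; cases h
  | some c =>
    cases flag with
    | false => rw [partOf_false] at h; cases h
    | true =>
      simp only [partOf, List.mem_singleton] at h
      subst h; rfl

lemma resolveCand_kind (p : PreData) (two : String) :
    ∀ d ∈ resolveCand p two, d.2 ≠ some "amount" := by
  intro d hd
  unfold resolveCand at hd
  dsimp only at hd
  split at hd
  · split at hd <;> simp_all
  · rcases List.mem_append.mp hd with hd' | hd'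
    · rcases List.mem_append.mp hd' with hd'' | hd''
      · rw [mem_partOf_snd hd'']; simp
      · rw [mem_partOf_snd hd'']; simp
    · rw [mem_partOf_snd hd']; simp

-- the graph value B records for a name (first component of every resolveB step)
def gvalB (p : PreData) (two : String) : Option String :=
  if isAmount two then p.amount.map (·.2)
  else
    match candMin (resolveCand p two) with
    | none => none
    | some (c, _) => some c.2

lemma resolveB_fst (p : PreData)
    (st : PySem.Dict String (Option String) × PySem.Dict String (String × String)) (two : String) :
    (resolveB p st two).1 = st.1.insert two (gvalB p two) := by
  unfold resolveB gvalB
  by_cases h : isAmount two = true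
  · rw [if_pos h, if_pos h]
    cases p.amount <;> rfl
  · rw [if_neg h, if_neg h]
    cases hm : candMin (resolveCand p two) with
    | none => rfl
    | some d => obtain ⟨c, kind⟩ := d; rfl

lemma resolveB_snd_amount (p : PreData)
    (st : PySem.Dict String (Option String) × PySem.Dict String (String × String)) (two : String)
    (h : isAmount two = true) (a : Int × String) (ha : p.amount = some a) :
    (resolveB p st two).2 = st.2.insert "amount" (a.2, two) := by
  unfold resolveB
  rw [if_pos h, ha]

lemma resolveB_snd_nonam (p : PreData)
    (st : PySem.Dict String (Option String) × PySem.Dict String (String × String)) (two : String)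
    (h : isAmount two = false) :
    (resolveB p st two).2.get? "amount" = st.2.get? "amount" := by
  unfold resolveB
  rw [if_neg (by simp [h])]
  cases hm : candMin (resolveCand p two) with
  | none => rfl
  | some d =>
    obtain ⟨c, kind⟩ := d
    cases kind with
    | none => rfl
    | some ky =>
      have hmem : ((c, some ky) : (Int × String) × Option String) ∈ resolveCand p two := by
        rw [candMin_eq_foldl] at hm
        rcases candMin_mem _ none _ hm with h' | h'
        · cases h'
        · exact h'
      have hk : ky ≠ "amount" := by
        intro he
        exact resolveCand_kind p two _ hmem (by rw [he])
      exact PySem.Dict.get?_insert_of_ne _ _ (fun he => hk he.symm)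

lemma foldl_fst_get_notmem
    (F : PySem.Dict String (Option String) × PySem.Dict String (String × String) → String →
      PySem.Dict String (Option String) × PySem.Dict String (String × String))
    (gv : String → Option String) :
    ∀ (l : List String)
      (st : PySem.Dict String (Option String) × PySem.Dict String (String × String)) (q : String),
    (∀ st' two, two ∈ l → (F st' two).1 = st'.1.insert two (gv two)) → q ∉ l →
    (l.foldl F st).1.get? q = st.1.get? q := by
  intro l
  induction l with
  | nil => intro st q _ _; rfl
  | cons s l ih =>
    intro st q hF hq
    rw [List.foldl_cons]
    rw [ih (F st s) q (fun st' two h => hF st' two (List.mem_cons_of_mem _ h))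
      (fun h => hq (List.mem_cons_of_mem _ h))]
    rw [hF st s List.mem_cons_self]
    exact PySem.Dict.get?_insert_of_ne _ _ (fun he => hq (he ▸ List.mem_cons_self))

lemma foldl_fst_get
    (F : PySem.Dict String (Option String) × PySem.Dict String (String × String) → String →
      PySem.Dict String (Option String) × PySem.Dict String (String × String))
    (gv : String → Option String) :
    ∀ (l : List String)
      (st : PySem.Dict String (Option String) × PySem.Dict String (String × String)) (q : String),
    (∀ st' two, two ∈ l → (F st' two).1 = st'.1.insert two (gv two)) → q ∈ l →
    (l.foldl F st).1.get? q = some (gv q) := by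
  intro l
  induction l with
  | nil => intro st q _ hq; cases hq
  | cons s l ih =>
    intro st q hF hq
    rw [List.foldl_cons]
    by_cases hql : q ∈ l
    · exact ih (F st s) q (fun st' two h => hF st' two (List.mem_cons_of_mem _ h)) hql
    · have hqs : q = s := by
        rcases List.mem_cons.mp hq with h | h
        · exact h
        · exact absurd h hql
      subst hqs
      rw [foldl_fst_get_notmem F gv l (F st q) q
        (fun st' two h => hF st' two (List.mem_cons_of_mem _ h)) hql]
      rw [hF st q List.mem_cons_self]
      exact PySem.Dict.get?_insert_self _ _ _

lemma foldl_snd_amount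
    (F : PySem.Dict String (Option String) × PySem.Dict String (String × String) → String →
      PySem.Dict String (Option String) × PySem.Dict String (String × String))
    (tv : String) :
    ∀ (l : List String)
      (st : PySem.Dict String (Option String) × PySem.Dict String (String × String)),
    (∀ st' two, two ∈ l → isAmount two = true → (F st' two).2 = st'.2.insert "amount" (tv, two)) →
    (∀ st' two, two ∈ l → isAmount two = false →
      (F st' two).2.get? "amount" = st'.2.get? "amount") →
    (l.foldl F st).2.get? "amount" =
      match (l.filter (fun s => isAmount s)).getLast? with
      | some a => some (tv, a)
      | none => st.2.get? "amount" := by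
  intro l
  induction l with
  | nil => intro st _ _; rfl
  | cons s l ih =>
    intro st hAm hNon
    rw [List.foldl_cons]
    rw [ih (F st s) (fun st' two h => hAm st' two (List.mem_cons_of_mem _ h))
      (fun st' two h => hNon st' two (List.mem_cons_of_mem _ h))]
    by_cases hs : isAmount s = true
    · rw [List.filter_cons_of_pos hs]
      cases hfl : (l.filter (fun s => isAmount s)).getLast? with
      | some a =>
        cases hfe : l.filter (fun s => isAmount s) with
        | nil => rw [hfe] at hfl; cases hfl
        | cons z zs =>
          rw [hfe] at hfl
          rw [List.getLast?_cons_cons, hfl]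
      | none =>
        cases hfe : l.filter (fun s => isAmount s) with
        | cons z zs => rw [hfe] at hfl; simp at hfl
        | nil =>
          rw [hAm st s List.mem_cons_self hs]
          simp [PySem.Dict.get?_insert_self]
    · have hsf : isAmount s = false := Bool.eq_false_iff.mpr hs
      rw [List.filter_cons_of_neg (by simp [hsf])]
      rw [hNon st s List.mem_cons_self hsf]

lemma getLast?_filter (P : String → Bool) :
    ∀ (l : List String) (a : String), l.getLast? = some a → P a = true →
      (l.filter P).getLast? = some a := by
  intro l
  induction l with
  | nil => intro a h _; cases h
  | cons x rest ih =>
    intro a h hp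
    cases rest with
    | nil =>
      have hxa : x = a := by simpa using h
      subst hxa
      simp [List.filter_cons, hp]
    | cons y ys =>
      rw [List.getLast?_cons_cons] at h
      have hres := ih a h hp
      rw [List.filter_cons]
      by_cases hx : P x = true
      · rw [if_pos hx]
        cases hfe : (y :: ys).filter P with
        | nil => rw [hfe] at hres; cases hres
        | cons z zs =>
          rw [hfe] at hres
          rw [List.getLast?_cons_cons]
          exact hres
      · rw [if_neg hx]
        exact hres

theorem tight_main (first second : List String) (hPre : first = [] → second = [])
    (hD : D_getBipartite first second) :
    getBipartite first second ≠ getBipartite_alt first second := by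
  obtain ⟨hany, hnG⟩ := hD
  obtain ⟨q, hq, hqa⟩ := List.any_eq_true.mp hany
  have hsne : second ≠ [] := List.ne_nil_of_mem hq
  have hf : first ≠ [] := fun he => hsne (hPre he)
  cases hfil : first.filter (fun s => isAmount s) with
  | nil => exact absurd (Or.inl hfil) hnG
  | cons h0 hs =>
  obtain ⟨vL, hvL⟩ := Option.isSome_iff_exists.mp
    (List.getLast?_isSome.mpr (List.cons_ne_nil h0 hs))
  obtain ⟨a, hpa, ha2⟩ : ∃ a, (precompF first).amount = some a ∧ a.2 = h0 := by
    have hmv := amount_val first 0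
    rw [hfil, ← precompF_eq] at hmv
    cases hpa : (precompF first).amount with
    | none => rw [hpa] at hmv; cases hmv
    | some a =>
      rw [hpa] at hmv
      exact ⟨a, rfl, by simpa using hmv⟩
  -- the constant graph value B records for an amount name
  have hgB : gvalB (precompF first) q = some h0 := by
    unfold gvalB
    rw [if_pos hqa, hpa]
    simp [ha2]
  -- step equations for A's fold function
  have hstepA : ∀ (st : PySem.Dict String (Option String) × PySem.Dict String (String × String))
      (two : String),
      scanA (first.length : Int) two (PySem.List.enumerate first 0) st.1 st.2 =
        if isAmount two then
          (st.1.insert two (match first.getLast? with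
            | some l => if isAmount l then some l else none
            | none => none),
           st.2.insert "amount" (vL, two))
        else resolveB (precompF first) st two := by
    intro st two
    have h0' : (first.length : Int) = 0 + (first.length : Int) := by ring
    conv_lhs => rw [h0']
    by_cases ht : isAmount two = true
    · rw [if_pos ht, scanA_amount two ht first 0 st.1 st.2 hf, hfil, hvL]
    · rw [if_neg ht, scan_eq_nonam two (Bool.eq_false_iff.mpr ht) first 0 st.1 st.2 hf,
        ← precompF_eq]
  intro heq
  have hresA : getBipartite first second =
      ((second.foldl
        (fun st two => scanA (first.length : Int) two (PySem.List.enumerate first 0) st.1 st.2)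
        (PySem.Dict.empty, PySem.Dict.empty)).1.items,
       (second.foldl
        (fun st two => scanA (first.length : Int) two (PySem.List.enumerate first 0) st.1 st.2)
        (PySem.Dict.empty, PySem.Dict.empty)).2.items) := rfl
  have hresB : getBipartite_alt first second =
      ((second.foldl (fun st two => resolveB (precompF first) st two)
        (PySem.Dict.empty, PySem.Dict.empty)).1.items,
       (second.foldl (fun st two => resolveB (precompF first) st two)
        (PySem.Dict.empty, PySem.Dict.empty)).2.items) := rfl
  rw [hresA, hresB] at heq
  have hG : (second.foldl
        (fun st two => scanA (first.length : Int) two (PySem.List.enumerate first 0) st.1 st.2)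
        (PySem.Dict.empty, PySem.Dict.empty)).1
      = (second.foldl (fun st two => resolveB (precompF first) st two)
        (PySem.Dict.empty, PySem.Dict.empty)).1 :=
    PySem.Dict.ext (congrArg Prod.fst heq)
  have hT : (second.foldl
        (fun st two => scanA (first.length : Int) two (PySem.List.enumerate first 0) st.1 st.2)
        (PySem.Dict.empty, PySem.Dict.empty)).2
      = (second.foldl (fun st two => resolveB (precompF first) st two)
        (PySem.Dict.empty, PySem.Dict.empty)).2 :=
    PySem.Dict.ext (congrArg Prod.snd heq)
  by_cases hvh : vL = h0
  · -- the last amount entries agree, so first's last element must not be h0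
    have hBfail : first.getLast? ≠ some h0 := by
      intro hLe
      apply hnG
      exact Or.inr ⟨by rw [hfil, hLe]; simp, by rw [hfil, hvL, hvh]; simp⟩
    obtain ⟨L, hL⟩ := Option.isSome_iff_exists.mp (List.getLast?_isSome.mpr hf)
    have hLa : isAmount L = false := by
      cases hla : isAmount L with
      | false => rfl
      | true =>
        have hlf := getLast?_filter (fun s => isAmount s) first L hL (by simpa using hla)
        rw [hfil, hvL] at hlf
        have hvl2 : vL = L := Option.some.inj hlf
        have hLh0 : L = h0 := by rw [← hvl2, hvh]
        exact absurd (hLh0 ▸ hL) hBfail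
    -- A records None for q, B records h0
    have hgAq : (match first.getLast? with
        | some l => if isAmount l then some l else none
        | none => none) = (none : Option String) := by
      rw [hL]
      simp [hLa]
    have hAq := foldl_fst_get
      (fun st two => scanA (first.length : Int) two (PySem.List.enumerate first 0) st.1 st.2)
      (fun two => if isAmount two then none else gvalB (precompF first) two)
      second (PySem.Dict.empty, PySem.Dict.empty) q
      (by
        intro st' two _
        dsimp only
        rw [hstepA st' two]
        by_cases ht : isAmount two = true
        · rw [if_pos ht, if_pos ht, hgAq]
        · rw [if_neg ht, if_neg ht]
          exact resolveB_fst _ st' two)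
      hq
    have hBq := foldl_fst_get
      (fun st two => resolveB (precompF first) st two)
      (fun two => gvalB (precompF first) two)
      second (PySem.Dict.empty, PySem.Dict.empty) q
      (fun st' two _ => resolveB_fst _ st' two)
      hq
    rw [hG] at hAq
    rw [hBq] at hAq
    dsimp only at hAq
    rw [if_pos hqa, hgB] at hAq
    cases hAq
  · -- the types dicts record different amount pairs
    obtain ⟨t2, ht2⟩ : ∃ t2, (second.filter (fun s => isAmount s)).getLast? = some t2 := by
      have hqf : q ∈ second.filter (fun s => isAmount s) := List.mem_filter.mpr ⟨hq, hqa⟩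
      exact Option.isSome_iff_exists.mp
        (List.getLast?_isSome.mpr (List.ne_nil_of_mem hqf))
    have hAt := foldl_snd_amount
      (fun st two => scanA (first.length : Int) two (PySem.List.enumerate first 0) st.1 st.2)
      vL second (PySem.Dict.empty, PySem.Dict.empty)
      (by
        intro st' two _ ht
        dsimp only
        rw [hstepA st' two, if_pos ht])
      (by
        intro st' two _ ht
        dsimp only
        rw [hstepA st' two, if_neg (by simp [ht])]
        exact resolveB_snd_nonam _ st' two ht)
    have hBt := foldl_snd_amount
      (fun st two => resolveB (precompF first) st two)
      h0 second (PySem.Dict.empty, PySem.Dict.empty)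
      (by
        intro st' two _ ht
        dsimp only
        rw [resolveB_snd_amount _ st' two ht a hpa, ha2])
      (fun st' two _ ht => resolveB_snd_nonam _ st' two ht)
    rw [ht2] at hAt hBt
    rw [hT] at hAt
    rw [hBt] at hAt
    have := Option.some.inj hAt
    exact hvh (congrArg Prod.fst this).symm

-- ===== VERDICT (by name: the statements are the Claim_ definitions above) =====
theorem getBipartite_spec : Claim_unchanged_getBipartite := by
  intro first second _ hPre
  unfold Spec_getBipartite
  intro hD
  exact main_eq first second hPre hD

theorem getBipartite_changed : Claim_changed_getBipartite := by
  unfold Claim_changed_getBipartite; decide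

theorem getBipartite_tight : Claim_exact_getBipartite := by
  intro first second _ hPre hD
  exact tight_main first second hPre hD
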